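-- pv_equiv track=rewrite | github.com/geemaple/leetcode | leetcode/809.expressive-words.py | check
-- ===== SOURCE A (Python) =====
-- def check(s: str, w: str) -> bool:
--     n = len(s)
--     m = len(w)
--     j = 0
--     for i in range(n):
--         if j < m and s[i] == w[j]:
--             j += 1
--         elif i >= 2 and s[i - 2] == s[i - 1] and s[i - 1] == s[i]:
--             continue
--         elif i >= 1 and i < n -1 and s[i - 1] == s[i] and s[i] == s[i + 1]:
--             continue
--         else:
--             return False
--
--     return j == m
-- ===== SOURCE B (Python) =====
-- def _groups(t):
--     gs = []
--     i = 0
--     n = len(t)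
--     while i < n:
--         j = i + 1
--         while j < n and t[j] == t[i]:
--             j += 1
--         gs.append((t[i], j - i))
--         i = j
--     return gs
--
-- def check(s: str, w: str) -> bool:
--     gs = _groups(s)
--     gw = _groups(w)
--     if len(gs) != len(gw):
--         return False
--     return all(cs == cw and not (nw > ns) and not (nw < ns and ns < 3)
--                for (cs, ns), (cw, nw) in zip(gs, gw))
-- ===== Notes on version B (the rewrite author's own statement) =====
-- stated objective: alternative
-- what changed: Replaces A's greedy two-pointer index scan (with lookback/lookahead skip conditions) by run-length encoding both strings once and comparing the paired (char,count) groups.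
import Mathlib
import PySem

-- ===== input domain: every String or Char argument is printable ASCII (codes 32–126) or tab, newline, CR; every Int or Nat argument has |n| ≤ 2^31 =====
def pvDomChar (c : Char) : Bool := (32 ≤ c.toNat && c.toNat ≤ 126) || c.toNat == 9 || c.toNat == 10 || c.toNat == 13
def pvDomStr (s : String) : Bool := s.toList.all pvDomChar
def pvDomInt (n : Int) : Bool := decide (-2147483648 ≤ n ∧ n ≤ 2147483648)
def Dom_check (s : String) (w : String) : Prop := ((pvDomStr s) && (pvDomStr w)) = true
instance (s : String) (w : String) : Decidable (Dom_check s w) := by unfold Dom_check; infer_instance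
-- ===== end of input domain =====

-- B replaces A's greedy two-pointer index scan by run-length encoding both strings and comparing paired (char,count) groups; alternative decomposition, same cost.


-- ===== PORT A =====
-- A's loop over i with pointer j, transcribed as structural recursion on the
-- remaining suffix of s; s[i-1], s[i-2] are carried as p1, p2 (none while i<1 / i<2),
-- s[i+1] is the head of the remaining suffix, and j is represented by the remaining
-- suffix of w (j == m ↔ that suffix is empty).  Branches in A's order.
def loopA (p2 p1 : Option Char) : List Char → List Char → Bool
  | [], wl => wl.isEmpty
  | c :: srest, wl =>
    if wl.head? == some c then loopA p1 (some c) srest wl.tail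
    else if p2 == some c && p1 == some c then loopA p1 (some c) srest wl
    else if p1 == some c && srest.head? == some c then loopA p1 (some c) srest wl
    else false

def check (s : String) (w : String) : Bool := loopA none none s.toList w.toList

-- ===== PORT B =====
-- inner while loop of _groups: length of the run of c at the front of the tail
def runLen (c : Char) : List Char → Nat
  | [] => 0
  | d :: rest => if d == c then runLen c rest + 1 else 0

-- outer while loop of _groups: run-length encoding
def groupsB : List Char → List (Char × Nat)
  | [] => []
  | c :: rest => (c, runLen c rest + 1) :: groupsB (rest.drop (runLen c rest))
termination_by l => l.length
decreasing_by simp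

def check_alt (s : String) (w : String) : Bool :=
  let gs := groupsB s.toList
  let gw := groupsB w.toList
  if gs.length != gw.length then false
  else (gs.zip gw).all fun p =>
    p.1.1 == p.2.1 && !(decide (p.1.2 < p.2.2)) && !(decide (p.2.2 < p.1.2) && decide (p.1.2 < 3))

-- ===== PRECONDITION & SPEC =====
def Spec_check (s : String) (w : String) (out : Bool) : Prop := out = check_alt s w
instance (s : String) (w : String) (out : Bool) : Decidable (Spec_check s w out) := by unfold Spec_check; infer_instance

-- ===== CLAIM (what is proved, stated in full; the proofs are below) =====
def Claim_equal_check : Prop := ∀ (s : String) (w : String), Dom_check s w → Spec_check s w (check s w)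

-- ===== LEMMAS AND PROOFS =====

-- group-by-group check that B's length test + zip/all computes
def gcheck : List (Char × Nat) → List (Char × Nat) → Bool
  | [], [] => true
  | [], _ :: _ => false
  | _ :: _, [] => false
  | (cs, ns) :: gs, (cw, nw) :: gw =>
    cs == cw && !(decide (ns < nw)) && !(decide (nw < ns) && decide (ns < 3)) && gcheck gs gw

lemma gcheck_char : ∀ gs gw : List (Char × Nat),
    gcheck gs gw = ((gs.length == gw.length) && (gs.zip gw).all fun p =>
      p.1.1 == p.2.1 && !(decide (p.1.2 < p.2.2)) && !(decide (p.2.2 < p.1.2) && decide (p.1.2 < 3))) := by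
  intro gs
  induction gs with
  | nil => intro gw; cases gw <;> simp [gcheck]
  | cons g gs ih =>
    intro gw
    cases gw with
    | nil => simp [gcheck]
    | cons h gw =>
      obtain ⟨cs, ns⟩ := g; obtain ⟨cw, nw⟩ := h
      have hlen : ((gs.length + 1 == gw.length + 1)) = (gs.length == gw.length) := by
        by_cases h : gs.length = gw.length <;> simp [h]
      simp only [gcheck, ih gw, List.zip_cons_cons, List.all_cons, List.length_cons, hlen,
        Bool.and_assoc, Bool.and_left_comm]

lemma check_alt_eq (s w : String) :
    check_alt s w = gcheck (groupsB s.toList) (groupsB w.toList) := by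
  unfold check_alt
  rw [gcheck_char]
  by_cases h : (groupsB s.toList).length = (groupsB w.toList).length <;> simp [h]

lemma runLen_eq_zero {c : Char} {l : List Char} (h : l.head? ≠ some c) : runLen c l = 0 := by
  cases l with
  | nil => rfl
  | cons d t => simp [List.head?] at h; simp [runLen, h]

lemma runLen_decomp (c : Char) : ∀ l : List Char,
    l = List.replicate (runLen c l) c ++ l.drop (runLen c l) := by
  intro l
  induction l with
  | nil => rfl
  | cons d t ih =>
    by_cases h : d = c
    · subst h; simp [runLen, List.replicate_succ]; exact ih
    · simp [runLen, h]

lemma head_drop_runLen (c : Char) : ∀ l : List Char, (l.drop (runLen c l)).head? ≠ some c := by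
  intro l
  induction l with
  | nil => simp
  | cons d t ih =>
    by_cases h : d = c
    · subst h; simpa [runLen] using ih
    · simp [runLen, h, List.head?]

lemma head_of_lt_runLen {c : Char} {l : List Char} {j : Nat} (h : j < runLen c l) :
    (l.drop j).head? = some c := by
  induction l generalizing j with
  | nil => simp [runLen] at h
  | cons d t ih =>
    by_cases hd : d = c
    · subst hd
      cases j with
      | zero => simp
      | succ j =>
        simp [runLen] at h
        simpa using ih (by omega)
    · simp [runLen, hd] at h

-- stuck: at a group boundary of s, if w still offers the old character, A fails
lemma loopA_stuck {c : Char} {rest' wrem : List Char} (p2 : Option Char)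
    (hr : rest'.head? ≠ some c) (hw : wrem.head? = some c) :
    loopA p2 (some c) rest' wrem = false := by
  cases rest' with
  | nil => cases wrem <;> simp_all [loopA, List.isEmpty]
  | cons d t =>
    simp [List.head?] at hr
    have hcd : (c = d) = False := by simp; exact fun h => hr h.symm
    simp [loopA, hw, hcd]

-- deep inside a run (both lookbacks equal c), A consumes min(leading c's of w, K) and skips the rest
lemma loopA_deep (c : Char) : ∀ (K : Nat) (rest' wrem : List Char),
    loopA (some c) (some c) (List.replicate K c ++ rest') wrem
      = loopA (some c) (some c) rest' (wrem.drop (min (runLen c wrem) K)) := by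
  intro K
  induction K with
  | zero => intro rest' wrem; simp
  | succ K ih =>
    intro rest' wrem
    cases wrem with
    | nil => simp [List.replicate_succ, loopA, runLen, ih]
    | cons e wt =>
      by_cases hec : e = c
      · subst hec
        simp [List.replicate_succ, loopA, runLen, ih, Nat.succ_min_succ]
      · simp [List.replicate_succ, loopA, runLen, hec, ih]

lemma runLen_pos {c : Char} {l : List Char} (h : l.head? = some c) : 0 < runLen c l := by
  cases l with
  | nil => simp at h
  | cons d t =>
    simp [List.head?] at h
    simp [runLen, h]

lemma main_lemma : ∀ (n : Nat) (sl wl : List Char) (p2 p1 : Option Char),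
    sl.length ≤ n → (∀ d t, sl = d :: t → p1 ≠ some d) →
    loopA p2 p1 sl wl = gcheck (groupsB sl) (groupsB wl) := by
  intro n
  induction n with
  | zero =>
    intro sl wl p2 p1 hn _
    have hsl : sl = [] := by cases sl <;> simp_all
    subst hsl
    cases wl <;> simp [loopA, groupsB, gcheck]
  | succ n ih =>
    intro sl wl p2 p1 hn hp
    cases sl with
    | nil => cases wl <;> simp [loopA, groupsB, gcheck]
    | cons c rest =>
      have hp1 : p1 ≠ some c := hp c rest rfl
      have hb1 : (p1 == some c) = false := beq_eq_false_iff_ne.mpr hp1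
      have hgs : groupsB (c :: rest) = (c, runLen c rest + 1) :: groupsB (rest.drop (runLen c rest)) := by
        rw [groupsB]
      set r' := rest.drop (runLen c rest) with hr'def
      have hrest' : r'.head? ≠ some c := head_drop_runLen c rest
      have hrb : (r'.head? == some c) = false := beq_eq_false_iff_ne.mpr hrest'
      have hinv : ∀ d t, r' = d :: t → (some c : Option Char) ≠ some d := by
        intro d t ht he
        apply hrest'
        rw [ht, ← Option.some.inj he]
        rfl
      have hlenr : rest.length ≤ n := by simp at hn; omega
      have hlen' : r'.length ≤ n := by
        have : r'.length ≤ rest.length := by rw [hr'def]; simp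
        omega
      cases wl with
      | nil =>
        have hgwnil : groupsB ([] : List Char) = [] := by rw [groupsB]
        simp [loopA, hb1, hgs, hgwnil, gcheck]
      | cons d wrest =>
        by_cases hdc : c = d
        · obtain rfl := hdc
          have hstep : loopA p2 p1 (c :: rest) (c :: wrest)
              = loopA p1 (some c) rest wrest := by
            simp [loopA]
          rw [hstep]
          have hgw : groupsB (c :: wrest)
              = (c, runLen c wrest + 1) :: groupsB (wrest.drop (runLen c wrest)) := by
            rw [groupsB]
          cases hK : runLen c rest with
          | zero =>
            have hr0 : r' = rest := by rw [hr'def, hK]; rfl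
            rw [hr0] at hrest' hinv hgs
            by_cases hwc : wrest.head? = some c
            · -- w still offers c but s's run is over: A is stuck, B sees nw > ns
              have hL1 : 0 < runLen c wrest := runLen_pos hwc
              rw [loopA_stuck p1 hrest' hwc]
              rw [hgs, hgw, hK]
              simp [gcheck, show (1:Nat) < runLen c wrest + 1 by omega]
            · have hL0 : runLen c wrest = 0 := runLen_eq_zero hwc
              rw [ih rest wrest p1 (some c) hlenr hinv]
              rw [hgs, hgw, hK, hL0]
              simp [gcheck]
          | succ K' =>
            have hdecomp : rest = c :: (List.replicate K' c ++ r') := by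
              conv_lhs => rw [runLen_decomp c rest]
              rw [← hr'def, hK, List.replicate_succ]
              rfl
            by_cases hwc : wrest.head? = some c
            · -- consume the second c of s's run, then skip deep through the rest of it
              cases wrest with
              | nil => simp at hwc
              | cons e wt =>
                simp [List.head?] at hwc
                obtain rfl := hwc.symm
                have hstep2 : loopA p1 (some c) rest (c :: wt)
                    = loopA (some c) (some c) (List.replicate K' c ++ r') wt := by
                  conv_lhs => rw [hdecomp]
                  simp [loopA]
                rw [hstep2, loopA_deep]
                by_cases hLK : runLen c wt ≤ K'
                · rw [Nat.min_eq_left hLK]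
                  rw [ih _ _ _ _ hlen' hinv]
                  rw [hgw, hgs, hK]
                  simp only [runLen, beq_self_eq_true]
                  by_cases hx : runLen c wt = K'
                  · simp [gcheck, hx]
                  · have h1 : ¬ (K' + 1 + 1 < runLen c wt + 1 + 1) := by omega
                    have h2 : ¬ (K' + 1 + 1 < 3) := by omega
                    simp [gcheck, h1, h2]
                · rw [Nat.min_eq_right (by omega : K' ≤ runLen c wt)]
                  have hdr : ((wt.drop K').head? = some c) := head_of_lt_runLen (by omega)
                  rw [loopA_stuck _ hrest' hdr]
                  rw [hgw, hgs, hK]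
                  simp only [runLen, beq_self_eq_true]
                  have h1 : K' + 1 + 1 < runLen c wt + 1 + 1 := by omega
                  simp [gcheck, h1]
            · -- w's run of c is exactly 1; the remaining run chars of s must be skippable
              have hL0 : runLen c wrest = 0 := runLen_eq_zero hwc
              have hwb : (wrest.head? == some c) = false := beq_eq_false_iff_ne.mpr hwc
              cases K'2 : K' with
              | zero =>
                -- s's run has length 2: position 2 of the run is not skippable
                have hstep2 : loopA p1 (some c) rest wrest = false := by
                  conv_lhs => rw [hdecomp]
                  rw [K'2]
                  simp [loopA, hwb, hb1, hrb]
                rw [hstep2, hgw, hgs, hK, K'2, hL0]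
                simp [gcheck]
              | succ K'' =>
                -- s's run has length ≥ 3: skip through it
                have hstep2 : loopA p1 (some c) rest wrest
                    = loopA (some c) (some c) (List.replicate K'' c ++ r') wrest := by
                  conv_lhs => rw [hdecomp]
                  rw [K'2, List.replicate_succ]
                  simp [loopA, hwb, hb1]
                rw [hstep2, loopA_deep, hL0]
                simp only [Nat.zero_min, List.drop_zero]
                rw [ih _ _ _ _ hlen' hinv]
                rw [hgw, hgs, hK, K'2, hL0]
                have h1 : ¬ (K'' + 1 + 1 + 1 < 0 + 1) := by omega
                have h2 : ¬ (K'' + 1 + 1 + 1 < 3) := by omega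
                simp [gcheck, h1, h2]
        · -- first characters differ: A fails at i = 0, B fails on the first group
          have hdc2 : ¬ d = c := fun h => hdc h.symm
          have hdb : ((d :: wrest).head? == some c) = false := by
            simp [List.head?]
            exact hdc2
          have hgw : groupsB (d :: wrest)
              = (d, runLen d wrest + 1) :: groupsB (wrest.drop (runLen d wrest)) := by
            rw [groupsB]
          have hcd : (c == d) = false := beq_eq_false_iff_ne.mpr hdc
          simp [loopA, hb1, hgs, hgw, gcheck, hcd, hdc2]

-- ===== VERDICT (by name: the statement is the Claim_ definition above) =====
theorem check_spec : Claim_equal_check := by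
  intro s w _
  unfold Spec_check check
  rw [check_alt_eq]
  exact main_lemma s.toList.length s.toList w.toList none none le_rfl (by simp)
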